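-- pv_equiv track=rewrite | github.com/MuhammadIbneRafiq/dc2-33 | Model/police_allocation.py | select_best_hours
-- ===== SOURCE A (Python) =====
-- def select_best_hours(hourly_risks, block_size=2, num_blocks=4, start_hour=6, end_hour=22):
--     """
--     Select the best 2-hour blocks for police allocation.
--     Returns a list of (start_hour, end_hour) tuples.
--     """
--     # Filter to patrol hours (6:00-22:00)
--     patrol_hours = {h: hourly_risks[h] for h in range(start_hour, end_hour)}
--
--     # Calculate risk for each possible block
--     block_risks = {}
--     for start in range(start_hour, end_hour - block_size + 1):
--         end = start + block_size
--         block_risk = sum(patrol_hours[h] for h in range(start, end))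
--         block_risks[(start, end)] = block_risk
--
--     # Sort blocks by risk and select top ones
--     sorted_blocks = sorted(block_risks.items(), key=lambda x: x[1], reverse=True)
--     best_blocks = []
--
--     # Select non-overlapping blocks
--     remaining_blocks = sorted_blocks.copy()
--     while len(best_blocks) < num_blocks and remaining_blocks:
--         # Get highest risk remaining block
--         best_block = remaining_blocks.pop(0)
--         best_blocks.append(best_block)
--
--         # Remove overlapping blocks
--         remaining_blocks = [b for b in remaining_blocks if
--                            not (b[0][0] < best_block[0][1] and b[0][1] > best_block[0][0])]
--
--     return best_blocks
-- ===== SOURCE B (Python) =====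
-- def select_best_hours(hourly_risks, block_size=2, num_blocks=4, start_hour=6, end_hour=22):
--     # Prefix sums of the patrol-hour risks: prefix[i] = sum of risks for hours start_hour..start_hour+i-1
--     prefix = [0]
--     for h in range(start_hour, end_hour):
--         prefix.append(prefix[-1] + hourly_risks[h])
--
--     # Each block's risk is a prefix-sum difference (exact: risks are ints)
--     blocks = [((s, s + block_size), prefix[s + block_size - start_hour] - prefix[s - start_hour])
--               for s in range(start_hour, end_hour - block_size + 1)]
--
--     # Stable ascending sort on the negated risk (= stable descending sort on risk)
--     blocks.sort(key=lambda x: -x[1])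
--
--     # Single forward pass: keep a candidate iff it is disjoint from every chosen block
--     chosen = []
--     for blk in blocks:
--         if len(chosen) >= num_blocks:
--             break
--         if all(blk[0][1] <= c[0][0] or blk[0][0] >= c[0][1] for c in chosen):
--             chosen.append(blk)
--     return chosen
-- ===== Notes on version B (the rewrite author's own statement) =====
-- stated objective: alternative
-- what changed: Replaces A's patrol-hours dict, per-block re-summation dict and pop-and-refilter while-loop with direct dict lookups into a prefix-sum array (each block risk is one subtraction, exact on ints), a stable sort on the negated risk, and a single forward pass that keeps a candidate iff it is disjoint from every kept block.
-- outside the precondition, e.g. on select_best_hours({6: 1, 7: 2}, -1, 1, 6, 8): A returns [((6, 5), 0)], B raises IndexError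
import Mathlib
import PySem

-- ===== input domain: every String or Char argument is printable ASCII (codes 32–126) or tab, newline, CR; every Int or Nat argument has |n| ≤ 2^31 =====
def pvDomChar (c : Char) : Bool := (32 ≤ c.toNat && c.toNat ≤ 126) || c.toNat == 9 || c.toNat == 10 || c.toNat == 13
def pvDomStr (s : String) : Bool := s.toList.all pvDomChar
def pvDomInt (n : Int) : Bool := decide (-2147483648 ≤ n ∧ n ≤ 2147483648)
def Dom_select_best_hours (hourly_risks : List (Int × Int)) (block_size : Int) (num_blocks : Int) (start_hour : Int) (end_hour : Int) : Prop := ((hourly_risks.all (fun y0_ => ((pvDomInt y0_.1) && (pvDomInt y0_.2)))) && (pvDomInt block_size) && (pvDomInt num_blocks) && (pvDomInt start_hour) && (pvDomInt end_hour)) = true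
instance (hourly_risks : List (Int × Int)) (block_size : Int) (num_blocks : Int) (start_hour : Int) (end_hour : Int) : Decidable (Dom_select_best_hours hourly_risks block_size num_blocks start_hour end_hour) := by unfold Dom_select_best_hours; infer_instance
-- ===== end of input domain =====

-- B replaces A's per-block summation dict with prefix sums (exact on ints), the patrol-hours dict
-- with direct lookups, the reverse sort with a stable sort on the negated risk, and the
-- pop-and-refilter while-loop with one forward pass over the sorted candidates (simpler).

-- ===== PORT A =====
-- while len(best_blocks) < num_blocks and remaining_blocks: pop head, append, refilter remaining
-- (fuel = length of the initial list, consumed one pop per iteration, only to make the loop total)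
def selLoopA : Nat → Int → List ((Int × Int) × Int) → List ((Int × Int) × Int) → List ((Int × Int) × Int)
  | 0, _, best, _ => best
  | fuel + 1, n, best, rem =>
    match rem with
    | [] => best
    | b :: rest =>
      if (best.length : Int) < n then
        selLoopA fuel n (best ++ [b])
          (rest.filter (fun x => !(decide (x.1.1 < b.1.2) && decide (x.1.2 > b.1.1))))
      else best

def select_best_hours (hourly_risks : List (Int × Int)) (block_size : Int) (num_blocks : Int) (start_hour : Int) (end_hour : Int) : List ((Int × Int) × Int) :=
  let patrol_hours : PySem.Dict Int Int :=
    (PySem.List.pyRange start_hour end_hour 1).foldl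
      (fun d h => d.insert h ((PySem.Dict.ofList hourly_risks).getD h 0)) PySem.Dict.empty
  let block_risks : PySem.Dict (Int × Int) Int :=
    (PySem.List.pyRange start_hour (end_hour - block_size + 1) 1).foldl
      (fun d start =>
        d.insert (start, start + block_size)
          ((PySem.List.pyRange start (start + block_size) 1).foldl
            (fun acc h => acc + patrol_hours.getD h 0) 0)) PySem.Dict.empty
  let sorted_blocks := PySem.List.sorted block_risks.items (fun x => x.2) true
  selLoopA sorted_blocks.length num_blocks [] sorted_blocks

-- ===== PORT B =====
-- for blk in blocks: break once len(chosen) >= num_blocks; keep blk iff disjoint from every chosen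
def selLoopB (n : Int) (best cand : List ((Int × Int) × Int)) : List ((Int × Int) × Int) :=
  match cand with
  | [] => best
  | b :: rest =>
    if (best.length : Int) ≥ n then best
    else if best.all (fun c => decide (b.1.2 ≤ c.1.1) || decide (b.1.1 ≥ c.1.2)) then
      selLoopB n (best ++ [b]) rest
    else selLoopB n best rest

def select_best_hours_alt (hourly_risks : List (Int × Int)) (block_size : Int) (num_blocks : Int) (start_hour : Int) (end_hour : Int) : List ((Int × Int) × Int) :=
  -- prefix[i] = sum of risks for hours start_hour .. start_hour+i-1 (prefix[-1] = last element)
  let pfx : List Int :=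
    (PySem.List.pyRange start_hour end_hour 1).foldl
      (fun p h => p ++ [PySem.List.pyGetD p (-1) 0 + (PySem.Dict.ofList hourly_risks).getD h 0]) [0]
  let blocks : List ((Int × Int) × Int) :=
    (PySem.List.pyRange start_hour (end_hour - block_size + 1) 1).map
      (fun s => ((s, s + block_size),
        PySem.List.pyGetD pfx (s + block_size - start_hour) 0
          - PySem.List.pyGetD pfx (s - start_hour) 0))
  selLoopB num_blocks [] (PySem.List.sorted blocks (fun x => -x.2) false)

-- ===== PRECONDITION & SPEC =====
-- Pre_ excludes (a) inputs where a patrol hour in range(start_hour, end_hour) is missing from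
-- hourly_risks — both Pythons raise KeyError there (stated by counting: the dict's distinct keys
-- inside [start_hour, end_hour) number exactly end_hour - start_hour) — and (b) negative
-- block_size with a nonempty candidate range, outside the task's natural domain: A there
-- fabricates inverted (s, s+block_size) blocks via Python's negative-range semantics while B's
-- prefix indexing raises IndexError (with an empty candidate range both return []; admitted).
def Pre_select_best_hours (hourly_risks : List (Int × Int)) (block_size : Int) (num_blocks : Int) (start_hour : Int) (end_hour : Int) : Prop :=
  (0 ≤ block_size ∨ end_hour - block_size + 1 ≤ start_hour) ∧
  (PySem.Dict.ofList hourly_risks).keys.countP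
    (fun k => decide (start_hour ≤ k) && decide (k < end_hour)) = (end_hour - start_hour).toNat
instance (hourly_risks : List (Int × Int)) (block_size : Int) (num_blocks : Int) (start_hour : Int) (end_hour : Int) : Decidable (Pre_select_best_hours hourly_risks block_size num_blocks start_hour end_hour) := by unfold Pre_select_best_hours; infer_instance

def pvWitness_select_best_hours : (List (Int × Int)) × Int × Int × Int × Int :=
  ([(6, 1), (7, 3), (8, 2), (9, 1)], 2, 2, 6, 10)

def Spec_select_best_hours (hourly_risks : List (Int × Int)) (block_size : Int) (num_blocks : Int) (start_hour : Int) (end_hour : Int) (out : List ((Int × Int) × Int)) : Prop := out = select_best_hours_alt hourly_risks block_size num_blocks start_hour end_hour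
instance (hourly_risks : List (Int × Int)) (block_size : Int) (num_blocks : Int) (start_hour : Int) (end_hour : Int) (out : List ((Int × Int) × Int)) : Decidable (Spec_select_best_hours hourly_risks block_size num_blocks start_hour end_hour out) := by unfold Spec_select_best_hours; infer_instance

-- ===== CLAIM (what is proved, stated in full; the proofs are below) =====
def Claim_equal_select_best_hours : Prop := ∀ (hourly_risks : List (Int × Int)) (block_size : Int) (num_blocks : Int) (start_hour : Int) (end_hour : Int), Dom_select_best_hours hourly_risks block_size num_blocks start_hour end_hour → Pre_select_best_hours hourly_risks block_size num_blocks start_hour end_hour → Spec_select_best_hours hourly_risks block_size num_blocks start_hour end_hour (select_best_hours hourly_risks block_size num_blocks start_hour end_hour)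

-- ===== LEMMAS AND PROOFS =====

-- proof-side twin of selLoopB carrying A's literal overlap test (the two tests are equal booleans)
def selLoopC (n : Int) (best cand : List ((Int × Int) × Int)) : List ((Int × Int) × Int) :=
  match cand with
  | [] => best
  | b :: rest =>
    if (best.length : Int) ≥ n then best
    else if best.all (fun c => !(decide (b.1.1 < c.1.2) && decide (b.1.2 > c.1.1))) then
      selLoopC n (best ++ [b]) rest
    else selLoopC n best rest

theorem cond_eq (b c : (Int × Int) × Int) :
    (decide (b.1.2 ≤ c.1.1) || decide (b.1.1 ≥ c.1.2))
      = !(decide (b.1.1 < c.1.2) && decide (b.1.2 > c.1.1)) := by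
  by_cases h1 : b.1.2 ≤ c.1.1 <;> by_cases h2 : b.1.1 ≥ c.1.2
  all_goals simp [h1, h2]
  all_goals omega

theorem selLoopB_eq_selLoopC (n : Int) :
    ∀ (cand best : List ((Int × Int) × Int)), selLoopB n best cand = selLoopC n best cand := by
  intro cand
  induction cand with
  | nil => intro best; rfl
  | cons b rest ih =>
    intro best
    rw [selLoopB, selLoopC]
    simp only [cond_eq, ih]

theorem selLoopC_stop (n : Int) (best cand : List ((Int × Int) × Int))
    (h : (best.length : Int) ≥ n) : selLoopC n best cand = best := by
  cases cand with
  | nil => rfl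
  | cons b rest => simp [selLoopC, h]

-- the forward pass skips candidates overlapping a kept block, so pre-filtering them away changes nothing
theorem selLoopC_filter (n : Int) (s : (Int × Int) × Int) :
    ∀ (cand best : List ((Int × Int) × Int)), s ∈ best →
      selLoopC n best
        (cand.filter (fun x => !(decide (x.1.1 < s.1.2) && decide (x.1.2 > s.1.1))))
        = selLoopC n best cand := by
  intro cand
  induction cand with
  | nil => intro best _; rfl
  | cons b rest ih =>
    intro best hs
    by_cases hlen : (best.length : Int) ≥ n
    · rw [selLoopC_stop n best _ hlen, selLoopC_stop n best _ hlen]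
    · by_cases hov : (!(decide (b.1.1 < s.1.2) && decide (b.1.2 > s.1.1))) = true
      · rw [List.filter_cons, if_pos hov]
        simp only [selLoopC, if_neg hlen]
        by_cases hall : best.all (fun t => !(decide (b.1.1 < t.1.2) && decide (b.1.2 > t.1.1))) = true
        · rw [hall, if_pos rfl, if_pos rfl, ih (best ++ [b]) (List.mem_append_left _ hs)]
        · rw [eq_false_of_ne_true hall]
          simp only [if_neg (Bool.false_ne_true)]
          exact ih best hs
      · rw [List.filter_cons, if_neg hov]
        have hall : best.all (fun t => !(decide (b.1.1 < t.1.2) && decide (b.1.2 > t.1.1))) = false := by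
          apply List.all_eq_false.mpr
          exact ⟨s, hs, hov⟩
        conv_rhs => rw [selLoopC]
        rw [if_neg hlen, hall]
        simp only [if_neg (Bool.false_ne_true)]
        exact ih best hs

-- main loop equivalence: when nothing remaining overlaps anything kept (A's refilter invariant),
-- A's pop-and-refilter loop and the forward pass agree
theorem selLoopA_eq_selLoopC (n : Int) :
    ∀ (fuel : Nat) (rem best : List ((Int × Int) × Int)), rem.length ≤ fuel →
      (∀ x ∈ rem, ∀ s ∈ best, (!(decide (x.1.1 < s.1.2) && decide (x.1.2 > s.1.1))) = true) →
      selLoopA fuel n best rem = selLoopC n best rem := by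
  intro fuel
  induction fuel with
  | zero =>
    intro rem best hlen _
    have : rem = [] := List.eq_nil_of_length_eq_zero (Nat.le_zero.mp hlen)
    subst this; rfl
  | succ fuel ih =>
    intro rem best hlen hinv
    cases rem with
    | nil => rfl
    | cons b rest =>
      by_cases hn : (best.length : Int) < n
      · show (if (best.length : Int) < n then _ else best) = _
        rw [if_pos hn]
        have hall : best.all (fun s => !(decide (b.1.1 < s.1.2) && decide (b.1.2 > s.1.1))) = true := by
          apply List.all_eq_true.mpr
          intro s hs
          exact hinv b (List.mem_cons_self ..) s hs
        conv_rhs => rw [selLoopC]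
        rw [if_neg (by omega), hall, if_pos rfl]
        rw [← selLoopC_filter n b rest (best ++ [b]) (List.mem_append_right _ (List.mem_cons_self ..))]
        apply ih
        · have := List.length_filter_le (fun x => !(decide (x.1.1 < b.1.2) && decide (x.1.2 > b.1.1))) rest
          simp only [List.length_cons, Nat.succ_le_succ_iff] at hlen
          omega
        · intro x hx s hs
          have hxr : x ∈ rest := List.mem_of_mem_filter hx
          rcases List.mem_append.mp hs with hs | hs
          · exact hinv x (List.mem_cons_of_mem _ hxr) s hs
          · rw [List.mem_singleton.mp hs]
            exact List.of_mem_filter (p := fun y : (Int × Int) × Int => !(decide (y.1.1 < b.1.2) && decide (y.1.2 > b.1.1))) hx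
      · show (if (best.length : Int) < n then _ else best) = _
        rw [if_neg hn, selLoopC, if_pos (show (best.length : Int) ≥ n by omega)]

-- a stable sort on the negated risk is A's stable reverse sort on the risk
theorem sorted_neg_eq_rev (xs : List ((Int × Int) × Int)) :
    PySem.List.sorted xs (fun x => -x.2) false = PySem.List.sorted xs (fun x => x.2) true := by
  rw [PySem.List.sorted_eq_foldl_insertBy, PySem.List.sorted_rev_eq_foldl_insertBy]
  have : (fun (a b : (Int × Int) × Int) => decide (-a.2 < -b.2))
       = (fun (a b : (Int × Int) × Int) => decide (b.2 < a.2)) := by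
    funext a b
    rw [decide_eq_decide]
    omega
  rw [this]

-- running sum of g over [a, b)
def sumG (g : Int → Int) (a b : Int) : Int :=
  (PySem.List.pyRange a b 1).foldl (fun acc h => acc + g h) 0

theorem sumG_succ (g : Int → Int) {a b : Int} (h : a ≤ b) :
    sumG g a (b + 1) = sumG g a b + g b := by
  unfold sumG
  rw [PySem.List.pyRange_one_succ_right h, List.foldl_append]
  rfl

theorem sumG_split (g : Int → Int) {a m b : Int} (h1 : a ≤ m) (h2 : m ≤ b) :
    sumG g a b = sumG g a m + sumG g m b := by
  unfold sumG
  rw [PySem.List.pyRange_one_append a m b h1 h2, List.foldl_append,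
      PySem.List.foldl_add, PySem.List.foldl_add, PySem.List.foldl_add]
  ring

-- the prefix-sum list B builds is the list of running sums of g
theorem prefix_build (g : Int → Int) (a : Int) : ∀ n : Nat,
    ((PySem.List.pyRange a (a + n) 1).foldl
      (fun p h => p ++ [PySem.List.pyGetD p (-1) 0 + g h]) [0])
    = (PySem.List.pyRange a (a + n + 1) 1).map (fun e => sumG g a e) := by
  intro n
  induction n with
  | zero =>
    simp only [Nat.cast_zero, add_zero]
    rw [PySem.List.pyRange_one_eq_nil (le_refl a), PySem.List.pyRange_one_singleton]
    simp [sumG, PySem.List.pyRange_one_eq_nil (le_refl a)]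
  | succ n ih =>
    have hle : a ≤ a + (n : Int) := by omega
    have e1 : a + (((n : Nat) + 1 : Nat) : Int) = a + (n : Int) + 1 := by push_cast; ring
    rw [e1, PySem.List.pyRange_one_succ_right hle,
        PySem.List.pyRange_one_succ_right (by omega : a ≤ a + (n : Int) + 1),
        List.foldl_append, ih, List.map_append]
    simp only [List.foldl_cons, List.foldl_nil, List.map_cons, List.map_nil]
    congr 1
    have hlast : PySem.List.pyGetD
        ((PySem.List.pyRange a (a + (n : Int) + 1) 1).map (fun e => sumG g a e)) (-1) 0
        = sumG g a (a + n) := by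
      rw [PySem.List.pyRange_one_succ_right hle, List.map_append]
      exact PySem.List.pyGetD_neg_one_append_singleton _ _ _
    rw [hlast, ← sumG_succ g hle]

-- getD after a keyed-insert loop: inserted keys read back their function value
theorem getD_foldl_insert_fun (f : Int → Int) :
    ∀ (l : List Int) (d : PySem.Dict Int Int) (x : Int),
      (l.foldl (fun d h => d.insert h (f h)) d).getD x 0
        = if x ∈ l then f x else d.getD x 0 := by
  intro l
  induction l with
  | nil => intro d x; simp
  | cons a l ih =>
    intro d x
    simp only [List.foldl_cons]
    rw [ih]
    by_cases hx : x ∈ l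
    · simp [List.mem_cons, or_iff_right_of_imp, hx]
    · rw [if_neg hx, PySem.Dict.getD_insert]
      by_cases hxa : x = a
      · simp [hxa]
      · simp [hxa, hx]

theorem select_best_hours_spec : Claim_equal_select_best_hours := by
  intro hourly_risks block_size num_blocks start_hour end_hour _ hpre
  obtain ⟨hd, -⟩ := hpre
  by_cases hbsc : 0 ≤ block_size
  case neg =>
    have hemp : end_hour - block_size + 1 ≤ start_hour := by
      rcases hd with h | h
      · omega
      · exact h
    unfold Spec_select_best_hours select_best_hours select_best_hours_alt
    simp only [PySem.List.pyRange_one_eq_nil hemp]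
    rfl
  have hbs : 0 ≤ block_size := hbsc
  unfold Spec_select_best_hours select_best_hours select_best_hours_alt
  -- A's block dict, itemised
  have hitems :
      ((PySem.List.pyRange start_hour (end_hour - block_size + 1) 1).foldl
        (fun d start =>
          d.insert (start, start + block_size)
            ((PySem.List.pyRange start (start + block_size) 1).foldl
              (fun acc h => acc +
                (((PySem.List.pyRange start_hour end_hour 1).foldl
                  (fun d h => d.insert h ((PySem.Dict.ofList hourly_risks).getD h 0))
                  PySem.Dict.empty).getD h 0)) 0)) PySem.Dict.empty).items
      = (PySem.List.pyRange start_hour (end_hour - block_size + 1) 1).map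
          (fun start => ((start, start + block_size),
            (PySem.List.pyRange start (start + block_size) 1).foldl
              (fun acc h => acc +
                (((PySem.List.pyRange start_hour end_hour 1).foldl
                  (fun d h => d.insert h ((PySem.Dict.ofList hourly_risks).getD h 0))
                  PySem.Dict.empty).getD h 0)) 0)) := by
    rw [PySem.Dict.items_foldl_insert_fresh _ (fun start => (start, start + block_size)) _ PySem.Dict.empty
        (fun a _ => PySem.Dict.contains_empty _)
        (List.Nodup.map (fun a b hab => by simpa using congrArg Prod.fst hab)
          (PySem.List.nodup_pyRange_one _ _))]
    simp [PySem.Dict.empty]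
  -- B's block list equals A's block list, elementwise via prefix sums
  have hmap :
      (PySem.List.pyRange start_hour (end_hour - block_size + 1) 1).map
        (fun s => ((s, s + block_size),
          PySem.List.pyGetD
            ((PySem.List.pyRange start_hour end_hour 1).foldl
              (fun p h => p ++ [PySem.List.pyGetD p (-1) 0 +
                (PySem.Dict.ofList hourly_risks).getD h 0]) [0])
            (s + block_size - start_hour) 0
          - PySem.List.pyGetD
            ((PySem.List.pyRange start_hour end_hour 1).foldl
              (fun p h => p ++ [PySem.List.pyGetD p (-1) 0 +
                (PySem.Dict.ofList hourly_risks).getD h 0]) [0])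
            (s - start_hour) 0))
      = (PySem.List.pyRange start_hour (end_hour - block_size + 1) 1).map
          (fun start => ((start, start + block_size),
            (PySem.List.pyRange start (start + block_size) 1).foldl
              (fun acc h => acc +
                (((PySem.List.pyRange start_hour end_hour 1).foldl
                  (fun d h => d.insert h ((PySem.Dict.ofList hourly_risks).getD h 0))
                  PySem.Dict.empty).getD h 0)) 0)) := by
    apply List.map_congr_left
    intro s hs
    rw [PySem.List.mem_pyRange_one] at hs
    have hse : start_hour ≤ end_hour := by omega
    set g : Int → Int := fun h => (PySem.Dict.ofList hourly_risks).getD h 0 with hg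
    -- the prefix list in closed form
    have hpfx :
        ((PySem.List.pyRange start_hour end_hour 1).foldl
          (fun p h => p ++ [PySem.List.pyGetD p (-1) 0 + g h]) [0])
        = (PySem.List.pyRange start_hour (end_hour + 1) 1).map (fun e => sumG g start_hour e) := by
      have := prefix_build g start_hour (end_hour - start_hour).toNat
      have ecast : start_hour + ((end_hour - start_hour).toNat : Int) = end_hour := by omega
      rwa [ecast] at this
    -- indexing the prefix list
    have hidx : ∀ e : Int, start_hour ≤ e → e ≤ end_hour →
        PySem.List.pyGetD
          ((PySem.List.pyRange start_hour (end_hour + 1) 1).map (fun e => sumG g start_hour e))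
          (e - start_hour) 0 = sumG g start_hour e := by
      intro e he1 he2
      have ek : e - start_hour = (((e - start_hour).toNat : Nat) : Int) := by omega
      rw [ek, PySem.List.pyGetD_map_pyRange_one _ _ _ _ _ (by omega)]
      congr 1
      omega
    -- A's inner sum with the patrol dict is the plain sum of g over the block
    have hsum :
        (PySem.List.pyRange s (s + block_size) 1).foldl
          (fun acc h => acc +
            (((PySem.List.pyRange start_hour end_hour 1).foldl
              (fun d h => d.insert h (g h)) PySem.Dict.empty).getD h 0)) 0
        = sumG g s (s + block_size) := by
      unfold sumG
      apply PySem.List.foldl_congr_mem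
      intro acc x hx
      rw [PySem.List.mem_pyRange_one] at hx
      rw [getD_foldl_insert_fun g _ _ _,
          if_pos (PySem.List.mem_pyRange_one.mpr ⟨by omega, by omega⟩)]
    simp only [hg] at hpfx hidx hsum
    simp only [hpfx]
    rw [hidx (s + block_size) (by omega) (by omega), hidx s (by omega) (by omega), hsum,
        sumG_split _ (show start_hour ≤ s by omega) (show s ≤ s + block_size by omega)]
    congr 1
    ring
  simp only [hitems, hmap, sorted_neg_eq_rev, selLoopB_eq_selLoopC]
  exact selLoopA_eq_selLoopC num_blocks _ _ [] (le_refl _) (by simp)
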